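-- pv_equiv track=rewrite | github.com/cg342/web_sample | allfunctions.py | SleepStageB4FinalWake
-- ===== SOURCE A (Python) =====
-- def SleepStageB4FinalWake(L):
--
--   sleep = [1,2,3,4,6]
--   has9 = False
--   has5 = False
--
--   # where the last slp stage is NOT 9
--   if L[-1]!=9:
--     for sleepstage in reversed(L):
--
--       if has5:
--         if sleepstage in sleep:
--           return sleepstage
--       if sleepstage==5:
--         has5 = True
--
--   else: # where the last slp is 9
--     for sleepstage in reversed(L):
--
--       if has9 and has5:
--         if sleepstage in sleep:
--           return sleepstage
--       if sleepstage==9: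
--         has9 = True
--       elif sleepstage==5:
--         has5 = True
-- ===== SOURCE B (Python) =====
-- def SleepStageB4FinalWake(L):
--     # Forward single pass: remember the most recent sleep stage; each time a 5
--     # appears, record that memory as the candidate answer.  The final candidate
--     # corresponds to the sleep stage just before the LAST 5, which is exactly
--     # what A's backward flag scans compute (A's 9 branch is redundant: has9 is
--     # set on the very first reversed element).
--     sleep = (1, 2, 3, 4, 6)
--     ans = None
--     last_sleep = None
--     for x in L:
--         if x == 5:
--             ans = last_sleep
--         elif x in sleep:
--             last_sleep = x
--     return ans
-- ===== Notes on version B (the rewrite author's own statement) =====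
-- stated objective: alternative
-- what changed: A's two backward flag-carrying loops with early return (branched on L[-1]==9, a branch that is redundant since has9 is set at the first reversed element) are replaced by a single FORWARD pass with two accumulators: remember the most recent sleep stage, and on every 5 record it as the candidate answer; the final candidate is returned.
-- outside the precondition, e.g. on SleepStageB4FinalWake([]): A raises IndexError, B returns None
-- crash fix: On the empty list A raises IndexError indexing the last element; B naturally returns None (its accumulators are never updated). — e.g. on SleepStageB4FinalWake([]): A raises IndexError, B returns none
import Mathlib
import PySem

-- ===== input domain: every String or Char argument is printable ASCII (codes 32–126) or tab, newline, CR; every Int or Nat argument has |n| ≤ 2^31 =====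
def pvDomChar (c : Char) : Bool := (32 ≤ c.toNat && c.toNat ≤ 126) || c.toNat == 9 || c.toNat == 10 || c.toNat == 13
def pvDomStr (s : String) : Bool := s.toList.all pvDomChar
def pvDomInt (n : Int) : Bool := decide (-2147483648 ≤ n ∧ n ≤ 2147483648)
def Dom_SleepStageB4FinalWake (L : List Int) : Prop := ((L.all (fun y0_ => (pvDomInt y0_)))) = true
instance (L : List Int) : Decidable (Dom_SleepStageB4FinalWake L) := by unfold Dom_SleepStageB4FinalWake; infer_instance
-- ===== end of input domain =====

-- B replaces A's two backward flag-scanning loops by one forward pass with two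
-- accumulators (objective: alternative decomposition, same cost).
-- B returns None on empty input where A raises IndexError (see Raises_ block).

-- ===== PORT A =====
-- the non-9 branch loop: state has5, early return
def pvGoA : List Int → Bool → Option Int
  | [], _ => none
  | x :: rest, has5 =>
      if has5 ∧ x ∈ ([1, 2, 3, 4, 6] : List Int) then some x
      else pvGoA rest (has5 ∨ x = 5)

-- the 9 branch loop: state (has9, has5), early return
def pvGoA9 : List Int → Bool → Bool → Option Int
  | [], _, _ => none
  | x :: rest, has9, has5 =>
      if has9 ∧ has5 ∧ x ∈ ([1, 2, 3, 4, 6] : List Int) then some x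
      else pvGoA9 rest (has9 ∨ x = 9) (if x = 9 then has5 else has5 ∨ x = 5)

def SleepStageB4FinalWake (L : List Int) : Option Int :=
  match PySem.List.pyGet? L (-1) with
  | none => none          -- L[-1] raises IndexError; excluded by Pre_
  | some last =>
      if last ≠ 9 then pvGoA L.reverse false
      else pvGoA9 L.reverse false false

-- ===== PORT B =====
-- one forward step over the state (ans, last_sleep)
def pvStepB (st : Option Int × Option Int) (x : Int) : Option Int × Option Int :=
  if x = 5 then (st.2, st.2)
  else if x ∈ ([1, 2, 3, 4, 6] : List Int) then (st.1, some x)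
  else st

def SleepStageB4FinalWake_alt (L : List Int) : Option Int :=
  (L.foldl pvStepB (none, none)).1

-- ===== PRECONDITION & SPEC =====
def Pre_SleepStageB4FinalWake (L : List Int) : Prop := L ≠ []
instance (L : List Int) : Decidable (Pre_SleepStageB4FinalWake L) := by unfold Pre_SleepStageB4FinalWake; infer_instance
def pvWitness_SleepStageB4FinalWake : List Int := [2, 5, 9]

-- On the empty list A raises IndexError indexing the last element while B returns None.
def Raises_SleepStageB4FinalWake (L : List Int) : Prop := L = []
instance (L : List Int) : Decidable (Raises_SleepStageB4FinalWake L) := by unfold Raises_SleepStageB4FinalWake; infer_instance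
def pvRaiseWitness_SleepStageB4FinalWake : List Int := []
def pvRaiseWitnessOut_SleepStageB4FinalWake : Option Int := none

def Spec_SleepStageB4FinalWake (L : List Int) (out : Option Int) : Prop := out = SleepStageB4FinalWake_alt L
instance (L : List Int) (out : Option Int) : Decidable (Spec_SleepStageB4FinalWake L out) := by unfold Spec_SleepStageB4FinalWake; infer_instance

-- ===== CLAIM =====
def Claim_equal_SleepStageB4FinalWake : Prop := ∀ (L : List Int), Dom_SleepStageB4FinalWake L → Pre_SleepStageB4FinalWake L → Spec_SleepStageB4FinalWake L (SleepStageB4FinalWake L)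
def Claim_raises_SleepStageB4FinalWake : Prop := (∀ (L : List Int), Dom_SleepStageB4FinalWake L → Raises_SleepStageB4FinalWake L → ¬ Pre_SleepStageB4FinalWake L) ∧ (Dom_SleepStageB4FinalWake (pvRaiseWitness_SleepStageB4FinalWake) ∧ Raises_SleepStageB4FinalWake (pvRaiseWitness_SleepStageB4FinalWake) ∧ SleepStageB4FinalWake_alt (pvRaiseWitness_SleepStageB4FinalWake) = pvRaiseWitnessOut_SleepStageB4FinalWake)

-- ===== LEMMAS AND PROOFS =====

-- first sleep stage of a list (characterises A's loop once has5 holds, and the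
-- .2 component of B's fold over the reversal)
def pvFirstSleep : List Int → Option Int
  | [] => none
  | x :: rest => if x ∈ ([1, 2, 3, 4, 6] : List Int) then some x else pvFirstSleep rest

-- with has5 already true, A's loop is exactly the plain first-sleep search
theorem pvGoA_true (M : List Int) : pvGoA M true = pvFirstSleep M := by
  induction M with
  | nil => rfl
  | cons x rest ih => simp [pvGoA, pvFirstSleep, ih]

-- once has9 is true, the 9-branch loop is the non-9 loop
theorem pvGoA9_true (M : List Int) (b : Bool) : pvGoA9 M true b = pvGoA M b := by
  induction M generalizing b with
  | nil => rfl
  | cons x rest ih =>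
    by_cases hx : x = 9
    · subst hx; simp [pvGoA9, pvGoA, ih]
    · simp [pvGoA9, pvGoA, hx, ih]

-- B's forward fold over M.reverse, as a function of the backward view M
def pvStB (M : List Int) : Option Int × Option Int :=
  M.reverse.foldl pvStepB (none, none)

theorem pvStB_cons (x : Int) (rest : List Int) :
    pvStB (x :: rest) = pvStepB (pvStB rest) x := by
  simp [pvStB, List.reverse_cons, List.foldl_append]

-- the last_sleep accumulator seen from the back is the first sleep stage
theorem pvStB_snd (M : List Int) : (pvStB M).2 = pvFirstSleep M := by
  induction M with
  | nil => rfl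
  | cons x rest ih =>
    rw [pvStB_cons]
    by_cases hx : x = 5
    · subst hx; simp [pvStepB, pvFirstSleep, ih]
    · by_cases hs : x ∈ ([1, 2, 3, 4, 6] : List Int)
      · simp [pvStepB, pvFirstSleep, hx, hs]
      · simp [pvStepB, pvFirstSleep, hx, hs, ih]

-- main invariant: B's ans accumulator equals A's backward loop
theorem pvStB_fst (M : List Int) : (pvStB M).1 = pvGoA M false := by
  induction M with
  | nil => rfl
  | cons x rest ih =>
    rw [pvStB_cons]
    by_cases hx : x = 5
    · subst hx
      simp [pvStepB, pvGoA, pvGoA_true, pvStB_snd]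
    · by_cases hs : x ∈ ([1, 2, 3, 4, 6] : List Int)
      · have h5 : (5 : Int) ∉ ([1, 2, 3, 4, 6] : List Int) := by decide
        simp [pvStepB, pvGoA, hx, hs, ih]
      · simp [pvStepB, pvGoA, hx, hs, ih]

-- A's 9 branch on a reversed list starting with 9 equals the non-9 loop
theorem pvGoA9_head9 (M : List Int) :
    pvGoA9 (9 :: M) false false = pvGoA (9 :: M) false := by
  have h9 : (9 : Int) ∉ ([1, 2, 3, 4, 6] : List Int) := by decide
  simp [pvGoA9, pvGoA, pvGoA9_true, h9]

-- ===== VERDICT =====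
theorem SleepStageB4FinalWake_spec : Claim_equal_SleepStageB4FinalWake := by
  intro L _ hL
  unfold Spec_SleepStageB4FinalWake SleepStageB4FinalWake
  have hrev : L.reverse ≠ [] := by simpa using hL
  obtain ⟨x, M, hM⟩ : ∃ x M, L.reverse = x :: M := by
    cases h : L.reverse with
    | nil => exact absurd h hrev
    | cons a t => exact ⟨a, t, rfl⟩
  have hget : PySem.List.pyGet? L (-1) = some x := by
    rw [PySem.List.pyGet?_neg_one, ← List.head?_reverse, hM]; rfl
  have hB : SleepStageB4FinalWake_alt L = pvGoA L.reverse false := by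
    have : pvStB L.reverse = L.foldl pvStepB (none, none) := by
      simp [pvStB]
    unfold SleepStageB4FinalWake_alt
    rw [← this, pvStB_fst]
  rw [hget, hB]
  by_cases hx9 : x = 9
  · subst hx9
    simp only [ne_eq, not_true_eq_false, if_false, hM]
    exact pvGoA9_head9 M
  · simp [hx9]

def SleepStageB4FinalWake_raises : Claim_raises_SleepStageB4FinalWake := by
  unfold Claim_raises_SleepStageB4FinalWake
  exact ⟨fun L _ h => by simp [Raises_SleepStageB4FinalWake, Pre_SleepStageB4FinalWake] at *; exact h, by decide⟩
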